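-- pv_equiv track=rewrite | github.com/JinMinji/Algorithm_questions | Python/Coding_Test/Kakao_2021_4.py | solution
-- ===== SOURCE A (Python) =====
-- import heapq
--
-- def dijkstra(graph, start):
--     distances = {node: float('inf') for node in graph}
--     distances[start] = 0
--     queue = []
--     heapq.heappush(queue, [distances[start], start])
--
--     while queue:
--         current_distance, current_node = heapq.heappop(queue)
--
--         if distances[current_node] < current_distance:
--             continue
--
--         for adjacent, weight in graph[current_node].items():
--             distance = current_distance + weight
--
--             if distance < distances[adjacent]:
--                 distances[adjacent] = distance
--                 heapq.heappush(queue, [distance, adjacent])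
--
--     return distances
--
-- def solution(n, s, a, b, fares):
--     answer = 0
--
--     graph = dict()
--     for i in range(len(fares)):
--         graph[fares[i][0]] = graph.get(fares[i][0], {})
--         graph[fares[i][0]][fares[i][1]] = fares[i][2]
--
--         graph[fares[i][1]] = graph.get(fares[i][1], {})
--         graph[fares[i][1]][fares[i][0]] = fares[i][2]
--
--     from_s = dijkstra(graph, s)
--     from_a = dijkstra(graph, a)
--     from_b = dijkstra(graph, b)
--
--     answer = min(from_s[a]+from_a[b], from_s[b]+from_b[a])
--
--     answer = min(answer, from_s[a]+from_s[b])
--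
--     return answer
-- ===== SOURCE B (Python) =====
-- def bellman_ford(graph, start):
--     distances = {node: float('inf') for node in graph}
--     distances[start] = 0
--     changed = True
--     while changed:
--         changed = False
--         for u in graph:
--             du = distances[u]
--             if du == float('inf'):
--                 continue
--             for v, w in graph[u].items():
--                 if du + w < distances[v]:
--                     distances[v] = du + w
--                     changed = True
--     return distances
--
-- def solution(n, s, a, b, fares):
--     graph = {}
--     for row in fares:
--         graph.setdefault(row[0], {})[row[1]] = row[2]
--         graph.setdefault(row[1], {})[row[0]] = row[2]
--
--     from_s = bellman_ford(graph, s)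
--     from_a = bellman_ford(graph, a)
--     from_b = bellman_ford(graph, b)
--
--     return min(from_s[a] + from_a[b],
--                from_s[b] + from_b[a],
--                from_s[a] + from_s[b])
-- ===== Notes on version B (the rewrite author's own statement) =====
-- stated objective: alternative
-- what changed: The heap-based Dijkstra helper is replaced by a Bellman-Ford helper that repeatedly relaxes every edge of the graph until a full pass changes no distance; graph building and the final min-of-three-routes formula are kept.
-- outside the precondition, e.g. on solution(9, 1, 1, 3, [[1, 2, 1], [3, 4, 1]]): A returns inf, B returns inf; on solution(9, 1, 2, 2, [[1, 2, 1], [3, 4, -5]]): A returns 1, B returns 1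
import Mathlib
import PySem

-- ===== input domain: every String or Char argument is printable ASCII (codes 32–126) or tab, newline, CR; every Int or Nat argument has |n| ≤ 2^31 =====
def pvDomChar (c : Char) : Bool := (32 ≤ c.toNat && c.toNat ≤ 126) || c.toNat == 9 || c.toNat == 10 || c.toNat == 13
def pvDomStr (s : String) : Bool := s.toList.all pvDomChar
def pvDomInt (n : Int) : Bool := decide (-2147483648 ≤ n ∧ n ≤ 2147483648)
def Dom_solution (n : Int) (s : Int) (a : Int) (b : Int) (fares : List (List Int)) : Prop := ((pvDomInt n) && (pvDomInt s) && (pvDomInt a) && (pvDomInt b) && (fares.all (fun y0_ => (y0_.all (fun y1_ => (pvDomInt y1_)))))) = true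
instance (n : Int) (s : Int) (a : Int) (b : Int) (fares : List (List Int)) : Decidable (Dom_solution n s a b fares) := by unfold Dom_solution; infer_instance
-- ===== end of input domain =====

-- B replaces the heap-based Dijkstra helper by a Bellman-Ford helper that relaxes all
-- edges until no distance changes; graph building and the final min formula are kept.
-- Both ports return the answer only (the Python raises / returns float inf outside Pre_).

-- ===== PORT A =====
-- 'inf'-or-int values are modelled as Option Int (none = float('inf')).

-- x < c where x may be inf (inf < c is False)
def oLT : Option Int → Int → Bool
  | none, _ => false
  | some v, c => decide (v < c)

-- c < x where x may be inf (c < inf is True)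
def oLT' : Int → Option Int → Bool
  | _, none => true
  | c, some v => decide (c < v)

-- x + y with inf absorbing
def oAdd : Option Int → Option Int → Option Int
  | some x, some y => some (x + y)
  | _, _ => none

-- min with inf greatest
def oMin : Option Int → Option Int → Option Int
  | some x, some y => some (min x y)
  | some x, none => some x
  | none, y => y

abbrev DAdj := PySem.Dict Int Int
abbrev DGraph := PySem.Dict Int DAdj
abbrev DDist := PySem.Dict Int (Option Int)

-- lexicographic comparison of heap entries [dist, node] (Python list comparison)
def lexLT (x y : Int × Int) : Bool := x.1 < y.1 || (x.1 == y.1 && x.2 < y.2)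

-- heapq.heappop: remove and return a minimal entry (entries are compared by value,
-- equal entries are interchangeable, so pop-min of the multiset is exact)
def popMin : List (Int × Int) → Option ((Int × Int) × List (Int × Int))
  | [] => none
  | h :: t =>
    let m := t.foldl (fun m e => if lexLT e m then e else m) h
    some (m, (h :: t).erase m)

-- the body of A's inner 'for adjacent, weight in graph[current_node].items()'
def relaxA (c : Int) (st : DDist × List (Int × Int)) (it : Int × Int) : DDist × List (Int × Int) :=
  let dist := c + it.2
  if oLT' dist (st.1.getD it.1 none) then (st.1.insert it.1 (some dist), (dist, it.1) :: st.2)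
  else st

-- A's 'while queue' loop; fuel is only a totalization guard (the Python loop can
-- diverge on negative weights, which Pre_ excludes; we prove fuel is never exhausted
-- under Pre_).  A missing graph key (Python KeyError, excluded by Pre_) is skipped.
def dijLoop (g : DGraph) : Nat → DDist × List (Int × Int) → DDist
  | 0, st => st.1
  | fuel + 1, (d, q) =>
    match popMin q with
    | none => d
    | some ((c, u), q') =>
      if oLT (d.getD u none) c then dijLoop g fuel (d, q')
      else
        match g.get? u with
        | none => dijLoop g fuel (d, q')
        | some adj => dijLoop g fuel (adj.items.foldl (relaxA c) (d, q'))

-- distances = {node: float('inf') for node in graph}; distances[start] = 0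
def initDist (g : DGraph) (s : Int) : DDist :=
  (g.items.foldl (fun d kv => d.insert kv.1 none) PySem.Dict.empty).insert s (some 0)

def dijFuel (g : DGraph) : Nat := 2 + (g.items.map (fun kv => kv.2.size)).sum

def dijkstra (g : DGraph) (s : Int) : DDist :=
  dijLoop g (dijFuel g) (initDist g s, [(0, s)])

-- graph[r0] = graph.get(r0, {}); graph[r0][r1] = r2  (and symmetrically)
def stepA (g : DGraph) (row : List Int) : DGraph :=
  let u := ((PySem.List.pyGet? row 0)).getD 0
  let v := ((PySem.List.pyGet? row 1)).getD 0
  let w := ((PySem.List.pyGet? row 2)).getD 0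
  let g1 := g.insert u (g.getD u PySem.Dict.empty)
  let g2 := g1.insert u ((g1.getD u PySem.Dict.empty).insert v w)
  let g3 := g2.insert v (g2.getD v PySem.Dict.empty)
  g3.insert v ((g3.getD v PySem.Dict.empty).insert u w)

def buildA (fares : List (List Int)) : DGraph := fares.foldl stepA PySem.Dict.empty

def solution (n : Int) (s : Int) (a : Int) (b : Int) (fares : List (List Int)) : Int :=
  let g := buildA fares
  let from_s := dijkstra g s
  let from_a := dijkstra g a
  let from_b := dijkstra g b
  -- from_s[a] + from_a[b] etc.; a missing key (Python KeyError, excluded by Pre_)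
  -- is collapsed to inf by .join; outside Pre_ the result is the junk default 0.
  let answer := oMin (oAdd (from_s.get? a).join (from_a.get? b).join)
                     (oAdd (from_s.get? b).join (from_b.get? a).join)
  let answer := oMin answer (oAdd (from_s.get? a).join (from_s.get? b).join)
  answer.getD 0

-- ===== PORT B =====

-- body of B's inner 'for v, w in graph[u].items()' (also sets the changed flag)
def relaxB (du : Int) (st : DDist × Bool) (it : Int × Int) : DDist × Bool :=
  if oLT' (du + it.2) (st.1.getD it.1 none) then (st.1.insert it.1 (some (du + it.2)), true)
  else st

-- one full pass over all edges
def passB (g : DGraph) (st : DDist × Bool) : DDist × Bool :=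
  g.items.foldl (fun st kv =>
    match st.1.getD kv.1 none with
    | none => st
    | some du => kv.2.items.foldl (relaxB du) st) st

-- B's 'while changed' loop; fuel is only a totalization guard (proved sufficient under Pre_)
def bfLoop (g : DGraph) : Nat → DDist → DDist
  | 0, d => d
  | fuel + 1, d =>
    let st := passB g (d, false)
    if st.2 then bfLoop g fuel st.1 else st.1

def bellmanFord (g : DGraph) (s : Int) : DDist :=
  bfLoop g (g.size + 2) (initDist g s)

-- graph.setdefault(r0, {})[r1] = r2  (and symmetrically)
def stepB (g : DGraph) (row : List Int) : DGraph :=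
  let u := ((PySem.List.pyGet? row 0)).getD 0
  let v := ((PySem.List.pyGet? row 1)).getD 0
  let w := ((PySem.List.pyGet? row 2)).getD 0
  let g1 := g.setdefault u PySem.Dict.empty
  let g2 := g1.insert u ((g1.getD u PySem.Dict.empty).insert v w)
  let g3 := g2.setdefault v PySem.Dict.empty
  g3.insert v ((g3.getD v PySem.Dict.empty).insert u w)

def buildB (fares : List (List Int)) : DGraph := fares.foldl stepB PySem.Dict.empty

def solution_alt (n : Int) (s : Int) (a : Int) (b : Int) (fares : List (List Int)) : Int :=
  let g := buildB fares
  let from_s := bellmanFord g s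
  let from_a := bellmanFord g a
  let from_b := bellmanFord g b
  -- min(x, y, z) = min(min(x, y), z)
  let answer := oMin (oMin (oAdd (from_s.get? a).join (from_a.get? b).join)
                           (oAdd (from_s.get? b).join (from_b.get? a).join))
                     (oAdd (from_s.get? a).join (from_s.get? b).join)
  answer.getD 0

-- ===== PRECONDITION & SPEC =====

-- neighbours of x listed by the fare rows (used only to state connectivity)
def preNbrs (fares : List (List Int)) (x : Int) : List Int :=
  fares.foldl (fun acc row =>
    match (PySem.List.pyGet? row 0), (PySem.List.pyGet? row 1) with
    | some u, some v => if u = x then acc ++ [v] else if v = x then acc ++ [u] else acc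
    | _, _ => acc) []

def preExpand (fares : List (List Int)) (cur : List Int) : List Int :=
  cur.foldl (fun acc x => PySem.Set.update acc (preNbrs fares x)) cur

def preReach (fares : List (List Int)) (x : Int) : List Int :=
  (preExpand fares)^[2 * fares.length + 2] [x]

def preNode (fares : List (List Int)) (x : Int) : Bool :=
  fares.any (fun row => (PySem.List.pyGet? row 0) == some x || (PySem.List.pyGet? row 1) == some x)

-- Pre_ excludes: fare rows shorter than 3 (A raises IndexError); s, a or b not an
-- endpoint of any fare (A raises KeyError); s, a, b not all in one connected
-- component (A returns float('inf'), not an int); and any negative fare, because a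
-- negative edge reachable from s, a or b makes A's Dijkstra loop forever (this also
-- excludes some inputs on which A returns, where B returns the same value — see cites).
def Pre_solution (n : Int) (s : Int) (a : Int) (b : Int) (fares : List (List Int)) : Prop :=
  (∀ row ∈ fares, 3 ≤ row.length ∧ 0 ≤ ((PySem.List.pyGet? row 2)).getD 0) ∧
  preNode fares s = true ∧ preNode fares a = true ∧ preNode fares b = true ∧
  a ∈ preReach fares s ∧ b ∈ preReach fares s

instance (n : Int) (s : Int) (a : Int) (b : Int) (fares : List (List Int)) : Decidable (Pre_solution n s a b fares) := by
  unfold Pre_solution; infer_instance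

def pvWitness_solution : Int × Int × Int × Int × List (List Int) := (6, 4, 6, 2, [[4, 1, 10], [3, 5, 24], [5, 6, 2], [3, 1, 41], [5, 1, 24], [4, 6, 50], [2, 4, 66], [2, 3, 22], [1, 6, 25]])

def Spec_solution (n : Int) (s : Int) (a : Int) (b : Int) (fares : List (List Int)) (out : Int) : Prop := out = solution_alt n s a b fares
instance (n : Int) (s : Int) (a : Int) (b : Int) (fares : List (List Int)) (out : Int) : Decidable (Spec_solution n s a b fares out) := by unfold Spec_solution; infer_instance

-- ===== CLAIM (what is proved, stated in full; the proofs are below) =====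
def Claim_equal_solution : Prop := ∀ (n : Int) (s : Int) (a : Int) (b : Int) (fares : List (List Int)), Dom_solution n s a b fares → Pre_solution n s a b fares → Spec_solution n s a b fares (solution n s a b fares)

-- ===== LEMMAS AND PROOFS =====

-- ---------- basic dictionary helpers ----------

theorem getD_none_some {d : DDist} {v : Int} {c : Int}
    (h : d.getD v none = some c) : d.get? v = some (some c) := by
  rw [PySem.Dict.getD_eq_get?_getD] at h
  cases hg : d.get? v with
  | none => rw [hg] at h; simp at h
  | some o => rw [hg] at h; cases o with
    | none => simp at h
    | some x => simp at h; simp [h]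

theorem get?_some_getD {d : DDist} {v : Int} {c : Int}
    (h : d.get? v = some (some c)) : d.getD v none = some c := by
  rw [PySem.Dict.getD_eq_get?_getD, h]; rfl

-- ---------- edges, walks, reachability ----------

def EdgeW (g : DGraph) (u v w : Int) : Prop :=
  ∃ adj, g.get? u = some adj ∧ adj.get? v = some w

inductive IsWalk (g : DGraph) (s : Int) : Int → Int → List Int → Prop
  | nil : IsWalk g s s 0 [s]
  | snoc {u v w c : Int} {l : List Int} :
      IsWalk g s u c l → EdgeW g u v w → IsWalk g s v (c + w) (l ++ [v])

def Reach (g : DGraph) (s v c : Int) : Prop := ∃ l, IsWalk g s v c l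

def MinD (g : DGraph) (s v : Int) : Option Int → Prop
  | some c => Reach g s v c ∧ ∀ c', Reach g s v c' → c ≤ c'
  | none => ∀ c', ¬ Reach g s v c'

structure GOK (g : DGraph) : Prop where
  nodup : g.keys.Nodup
  inner : ∀ u adj, g.get? u = some adj → adj.keys.Nodup
  nonneg : ∀ u v w, EdgeW g u v w → 0 ≤ w
  closed : ∀ u v w, EdgeW g u v w → g.contains v = true

theorem walk_nonneg {g : DGraph} {s : Int} (H : GOK g) :
    ∀ {v c : Int} {l : List Int}, IsWalk g s v c l → 0 ≤ c := by
  intro v c l h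
  induction h with
  | nil => omega
  | snoc hw he ih => have := H.nonneg _ _ _ he; omega

theorem walk_head {g : DGraph} {s : Int} :
    ∀ {v c : Int} {l : List Int}, IsWalk g s v c l → ∃ t, l = s :: t := by
  intro v c l h
  induction h with
  | nil => exact ⟨[], rfl⟩
  | snoc hw he ih => obtain ⟨t, rfl⟩ := ih; exact ⟨t ++ [_], rfl⟩

theorem walk_ne_nil {g : DGraph} {s v c : Int} {l : List Int} (h : IsWalk g s v c l) :
    l ≠ [] := by
  obtain ⟨t, rfl⟩ := walk_head h; simp

theorem walk_nodes {g : DGraph} {s : Int} (H : GOK g) :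
    ∀ {v c : Int} {l : List Int}, IsWalk g s v c l → ∀ x ∈ l, x = s ∨ x ∈ g.keys := by
  intro v c l h
  induction h with
  | nil => intro x hx; simp at hx; exact Or.inl hx
  | snoc hw he ih =>
      intro x hx
      rw [List.mem_append] at hx
      rcases hx with hx | hx
      · exact ih x hx
      · simp at hx; subst hx
        have := H.closed _ _ _ he
        exact Or.inr ((PySem.Dict.contains_iff_mem_keys _ _).mp this)

theorem walk_short {g : DGraph} {s v c : Int} {l : List Int}
    (h : IsWalk g s v c l) (hl : l.length ≤ 1) : v = s ∧ c = 0 := by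
  cases h with
  | nil => exact ⟨rfl, rfl⟩
  | snoc hw he =>
      exfalso
      rename_i u w c' l'
      obtain ⟨t, rfl⟩ := walk_head hw
      simp at hl

theorem walk_split {g : DGraph} {s : Int} :
    ∀ {v c : Int} {l : List Int}, IsWalk g s v c l →
    ∀ la (x : Int) lb, l = la ++ x :: lb →
    ∃ c1 c2, IsWalk g s x c1 (la ++ [x]) ∧ IsWalk g x v c2 (x :: lb) ∧ c = c1 + c2 := by
  intro v c l h
  induction h with
  | nil =>
      intro la x lb hl
      cases la with
      | cons a t =>
          exfalso
          injection hl with h1 h2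
          exact absurd h2.symm (by simp)
      | nil =>
          rw [List.nil_append] at hl
          injection hl with h1 h2
          subst h2
          have h1' : x = s := h1.symm
          subst h1'
          exact ⟨0, 0, IsWalk.nil, IsWalk.nil, by ring⟩
  | @snoc u v' w c' l' hw he ih =>
      intro la x lb hl
      rcases lb.eq_nil_or_concat with hnil | ⟨lb', y, rfl⟩
      · subst hnil
        have hx : l' = la ∧ v' = x := by
          have : l' ++ [v'] = la ++ [x] := hl
          rw [← List.concat_eq_append, ← List.concat_eq_append] at this
          exact List.concat_inj.mp this
        obtain ⟨rfl, rfl⟩ := hx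
        exact ⟨c' + w, 0, IsWalk.snoc hw he, IsWalk.nil, by ring⟩
      · have hx : l' = la ++ x :: lb' ∧ v' = y := by
          have : l' ++ [v'] = (la ++ x :: lb') ++ [y] := by
            rw [hl]; simp
          rw [← List.concat_eq_append, ← List.concat_eq_append] at this
          exact List.concat_inj.mp this
        obtain ⟨hx1, rfl⟩ := hx
        obtain ⟨c1, c2, w1, w2, hc⟩ := ih la x lb' hx1
        refine ⟨c1, c2 + w, w1, ?_, by omega⟩
        have := IsWalk.snoc w2 he
        simpa using this

theorem walk_glue_aux {g : DGraph} {x : Int} :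
    ∀ {v c2 : Int} {L : List Int}, IsWalk g x v c2 L →
    ∀ {s c1 : Int} {l1 lb : List Int}, IsWalk g s x c1 l1 → L = x :: lb →
    IsWalk g s v (c1 + c2) (l1 ++ lb) := by
  intro v c2 L h2
  induction h2 with
  | nil =>
      intro s c1 l1 lb h1 hL
      injection hL with h1' h2'
      subst h2'
      simpa using h1
  | @snoc u v' w c' l' hw he ih =>
      intro s c1 l1 lb h1 hL
      obtain ⟨t, rfl⟩ := walk_head hw
      rw [List.cons_append] at hL
      injection hL with h1' h2'
      subst h2'
      have := IsWalk.snoc (ih h1 rfl) he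
      simpa [List.append_assoc, add_assoc] using this

theorem walk_glue {g : DGraph} {s x : Int} {c1 : Int} {l1 : List Int}
    (h1 : IsWalk g s x c1 l1) {v c2 : Int} {lb : List Int}
    (h2 : IsWalk g x v c2 (x :: lb)) : IsWalk g s v (c1 + c2) (l1 ++ lb) :=
  walk_glue_aux h2 h1 rfl

theorem walk_inv {g : DGraph} {s v c : Int} {l : List Int} (h : IsWalk g s v c l) :
    (v = s ∧ c = 0 ∧ l = [s]) ∨
    ∃ (u w c' : Int) (l' : List Int),
      IsWalk g s u c' l' ∧ EdgeW g u v w ∧ c = c' + w ∧ l = l' ++ [v] := by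
  cases h with
  | nil => exact Or.inl ⟨rfl, rfl, rfl⟩
  | snoc hw he => exact Or.inr ⟨_, _, _, _, hw, he, rfl, rfl⟩

theorem not_nodup_split {l : List Int} (h : ¬ l.Nodup) :
    ∃ (l1 : List Int) (x : Int) (l2 l3 : List Int), l = l1 ++ x :: l2 ++ x :: l3 := by
  induction l with
  | nil => simp at h
  | cons a t ih =>
      by_cases hm : a ∈ t
      · obtain ⟨l2, l3, rfl⟩ := List.append_of_mem hm
        exact ⟨[], a, l2, l3, by simp⟩
      · have : ¬ t.Nodup := by
          intro hn; exact h (List.nodup_cons.mpr ⟨hm, hn⟩)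
        obtain ⟨l1, x, l2, l3, rfl⟩ := ih this
        exact ⟨a :: l1, x, l2, l3, by simp⟩

theorem walk_simplify {g : DGraph} {s : Int} (H : GOK g) :
    ∀ (n : Nat) {v c : Int} {l : List Int}, IsWalk g s v c l → l.length ≤ n →
    ∃ c' l', IsWalk g s v c' l' ∧ c' ≤ c ∧ l'.Nodup ∧ l'.length ≤ l.length := by
  intro n
  induction n with
  | zero => intro v c l h hl; exact absurd (walk_ne_nil h) (by
      cases l with
      | nil => simp
      | cons a t => simp at hl)
  | succ n ih =>
      intro v c l h hl
      by_cases hnd : l.Nodup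
      · exact ⟨c, l, h, le_refl _, hnd, le_refl _⟩
      · obtain ⟨l1, x, l2, l3, rfl⟩ := not_nodup_split hnd
        obtain ⟨c1, c2, w1, w2, hc⟩ := walk_split h l1 x (l2 ++ x :: l3) (by simp)
        obtain ⟨c21, c22, w21, w22, hc2⟩ := walk_split w2 (x :: l2) x l3 (by simp)
        have hglue := walk_glue w1 w22
        have h0 : 0 ≤ c21 := walk_nonneg H w21
        have hlen : (l1 ++ [x] ++ l3).length ≤ n := by
          simp at hl ⊢; omega
        obtain ⟨c', l', hw', hc', hnd', hlen'⟩ := ih hglue hlen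
        refine ⟨c', l', hw', by omega, hnd', by simp at hlen' ⊢; omega⟩

theorem nodup_walk_len {g : DGraph} {s : Int} (H : GOK g) {v c : Int} {l : List Int}
    (h : IsWalk g s v c l) (hnd : l.Nodup) : l.length ≤ g.size + 1 := by
  classical
  have hsub : ∀ x ∈ l, x ∈ s :: g.keys := by
    intro x hx
    rcases walk_nodes H h x hx with h1 | h1
    · simp [h1]
    · simp [h1]
  have h1 : l.length = l.toFinset.card := (List.toFinset_card_of_nodup hnd).symm
  have h2 : l.toFinset ⊆ (s :: g.keys).toFinset := by
    intro x hx
    rw [List.mem_toFinset] at hx ⊢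
    exact hsub x hx
  have h3 := Finset.card_le_card h2
  have h4 := (s :: g.keys).toFinset_card_le
  have h5 : (s :: g.keys).length = g.keys.length + 1 := by simp
  have h6 : g.keys.length = g.size := by
    simp [PySem.Dict.keys, PySem.Dict.size]
  omega

theorem minD_unique {g : DGraph} {s v : Int} {o o' : Option Int}
    (h : MinD g s v o) (h' : MinD g s v o') : o = o' := by
  cases o with
  | none => cases o' with
    | none => rfl
    | some c' => exact absurd h'.1 (h c')
  | some c => cases o' with
    | none => exact absurd h.1 (h' c)
    | some c' =>
        have := h.2 c' h'.1
        have := h'.2 c h.1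
        simp; omega

-- ---------- shared final-state machinery ----------

def KeysOK (g : DGraph) (s : Int) (d : DDist) : Prop :=
  ∀ v, (d.get? v).isSome = true ↔ (v ∈ g.keys ∨ v = s)

def Supp (g : DGraph) (s : Int) (d : DDist) : Prop :=
  ∀ v c, d.get? v = some (some c) → Reach g s v c

def StabAt (g : DGraph) (d : DDist) (u : Int) : Prop :=
  ∀ v w cu, EdgeW g u v w → d.get? u = some (some cu) →
    ∃ cv, d.get? v = some (some cv) ∧ cv ≤ cu + w

def ResOK (g : DGraph) (s : Int) (d : DDist) : Prop :=
  ∀ v, ((v ∈ g.keys ∨ v = s) → ∃ o, d.get? v = some o ∧ MinD g s v o) ∧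
       (¬ (v ∈ g.keys ∨ v = s) → d.get? v = none)

theorem resOK_eq {g : DGraph} {s : Int} {d1 d2 : DDist}
    (h1 : ResOK g s d1) (h2 : ResOK g s d2) : ∀ v, d1.get? v = d2.get? v := by
  intro v
  by_cases hv : v ∈ g.keys ∨ v = s
  · obtain ⟨o1, ho1, hm1⟩ := (h1 v).1 hv
    obtain ⟨o2, ho2, hm2⟩ := (h2 v).1 hv
    rw [ho1, ho2, minD_unique hm1 hm2]
  · rw [(h1 v).2 hv, (h2 v).2 hv]

theorem stab_min {g : DGraph} {s : Int} {d : DDist} (H : GOK g)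
    (hs0 : d.get? s = some (some 0)) (hst : ∀ u, StabAt g d u) :
    ∀ {v c : Int} {l : List Int}, IsWalk g s v c l →
    ∃ cv, d.get? v = some (some cv) ∧ cv ≤ c := by
  intro v c l h
  induction h with
  | nil => exact ⟨0, hs0, le_refl _⟩
  | @snoc u v' w c' l' hw he ih =>
      obtain ⟨cu, hcu, hle⟩ := ih
      obtain ⟨cv, hcv, hle2⟩ := hst u v' w cu he hcu
      exact ⟨cv, hcv, by omega⟩

theorem final_resOK {g : DGraph} {s : Int} {d : DDist} (H : GOK g)
    (hk : KeysOK g s d) (hsupp : Supp g s d) (hs0 : d.get? s = some (some 0))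
    (hst : ∀ u, StabAt g d u) : ResOK g s d := by
  intro v
  constructor
  · intro hv
    have := (hk v).mpr hv
    cases ho : d.get? v with
    | none => rw [ho] at this; simp at this
    | some o =>
        refine ⟨o, rfl, ?_⟩
        cases o with
        | none =>
            intro c' ⟨l, hw⟩
            obtain ⟨cv, hcv, _⟩ := stab_min H hs0 hst hw
            rw [ho] at hcv; simp at hcv
        | some c =>
            refine ⟨hsupp v c ho, ?_⟩
            intro c' ⟨l, hw⟩
            obtain ⟨cv, hcv, hle⟩ := stab_min H hs0 hst hw
            rw [ho] at hcv
            simp at hcv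
            omega
  · intro hv
    cases ho : d.get? v with
    | none => rfl
    | some o =>
        exfalso
        exact hv ((hk v).mp (by rw [ho]; rfl))

def Upto (g : DGraph) (s : Int) (j : Nat) (d : DDist) : Prop :=
  ∀ v c (l : List Int), IsWalk g s v c l → l.length ≤ j + 1 →
    ∃ cv, d.get? v = some (some cv) ∧ cv ≤ c

theorem upto_resOK {g : DGraph} {s : Int} {d : DDist} {j : Nat} (H : GOK g)
    (hk : KeysOK g s d) (hsupp : Supp g s d)
    (hj : g.size ≤ j) (hU : Upto g s j d) : ResOK g s d := by
  intro v
  constructor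
  · intro hv
    have := (hk v).mpr hv
    cases ho : d.get? v with
    | none => rw [ho] at this; simp at this
    | some o =>
        refine ⟨o, rfl, ?_⟩
        have key : ∀ c', Reach g s v c' → ∃ cv, d.get? v = some (some cv) ∧ cv ≤ c' := by
          intro c' ⟨l, hw⟩
          obtain ⟨c'', l'', hw'', hc'', hnd'', _⟩ := walk_simplify H l.length hw (le_refl _)
          have hlen := nodup_walk_len H hw'' hnd''
          obtain ⟨cv, hcv, hle⟩ := hU v c'' l'' hw'' (by omega)
          exact ⟨cv, hcv, by omega⟩
        cases o with
        | none =>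
            intro c' hr
            obtain ⟨cv, hcv, _⟩ := key c' hr
            rw [ho] at hcv; simp at hcv
        | some c =>
            refine ⟨hsupp v c ho, ?_⟩
            intro c' hr
            obtain ⟨cv, hcv, hle⟩ := key c' hr
            rw [ho] at hcv; simp at hcv; omega
  · intro hv
    cases ho : d.get? v with
    | none => rfl
    | some o => exact absurd ((hk v).mp (by rw [ho]; rfl)) hv

-- ---------- initial distances ----------

theorem foldl_insert_none_get? :
    ∀ (L : List (Int × DAdj)) (d : DDist) (v : Int),
    (L.foldl (fun d kv => d.insert kv.1 none) d).get? v =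
      if v ∈ L.map Prod.fst then some none else d.get? v := by
  intro L
  induction L with
  | nil => intro d v; simp
  | cons kv t ih =>
      intro d v
      simp only [List.foldl_cons, ih, List.map_cons, List.mem_cons]
      rw [PySem.Dict.get?_insert]
      by_cases h1 : v ∈ t.map Prod.fst
      · simp [h1]
      · by_cases h2 : v = kv.1 <;> simp [h1, h2]

theorem initDist_get? (g : DGraph) (s v : Int) :
    (initDist g s).get? v =
      if v = s then some (some 0) else if v ∈ g.keys then some none else none := by
  unfold initDist
  rw [PySem.Dict.get?_insert, foldl_insert_none_get?]
  have : g.items.map Prod.fst = g.keys := by simp [PySem.Dict.keys]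
  rw [this, PySem.Dict.get?_empty]

theorem initDist_keysOK (g : DGraph) (s : Int) : KeysOK g s (initDist g s) := by
  intro v
  rw [initDist_get?]
  by_cases h1 : v = s
  · simp [h1]
  · by_cases h2 : v ∈ g.keys <;> simp [h1, h2]

theorem initDist_s0 (g : DGraph) (s : Int) : (initDist g s).get? s = some (some 0) := by
  rw [initDist_get?]; simp

theorem initDist_supp (g : DGraph) (s : Int) : Supp g s (initDist g s) := by
  intro v c h
  rw [initDist_get?] at h
  by_cases h1 : v = s
  · rw [if_pos h1] at h
    have hc : c = 0 := by simpa using h.symm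
    subst hc
    rw [h1]
    exact ⟨[s], IsWalk.nil⟩
  · rw [if_neg h1] at h
    by_cases h2 : v ∈ g.keys <;> simp [h2] at h

-- ---------- popMin (heap pop) ----------

theorem lexLT_irrefl (x : Int × Int) : lexLT x x = false := by
  simp [lexLT]

theorem lexLT_ff_trans {a b c : Int × Int}
    (h1 : lexLT b a = false) (h2 : lexLT c b = false) : lexLT c a = false := by
  simp [lexLT] at *; omega

theorem lexLT_ff_tt {a b c : Int × Int}
    (h1 : lexLT b a = false) (h2 : lexLT b c = true) : lexLT c a = false := by
  simp [lexLT] at *; omega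

theorem lexLT_false_fst {e m : Int × Int} (h : lexLT e m = false) : m.1 ≤ e.1 := by
  simp [lexLT] at h; omega

theorem foldl_min_mem : ∀ (t : List (Int × Int)) (h : Int × Int),
    t.foldl (fun m e => if lexLT e m then e else m) h ∈ h :: t := by
  intro t
  induction t with
  | nil => intro h; simp
  | cons e t' ih =>
      intro h
      simp only [List.foldl_cons]
      have := ih (if lexLT e h then e else h)
      rcases List.mem_cons.mp this with h1 | h1
      · rw [h1]
        by_cases hc : lexLT e h = true
        · simp [hc]
        · simp at hc; simp [hc]
      · simp [h1]

theorem foldl_min_le : ∀ (t : List (Int × Int)) (h : Int × Int),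
    ∀ e ∈ h :: t, lexLT e (t.foldl (fun m e => if lexLT e m then e else m) h) = false := by
  intro t
  induction t with
  | nil =>
      intro h e he
      simp at he; subst he; simp [lexLT_irrefl]
  | cons e' t' ih =>
      intro h e he
      simp only [List.foldl_cons]
      set m1 := if lexLT e' h then e' else h with hm1
      have ihh := ih m1
      rcases List.mem_cons.mp he with rfl | he2
      · by_cases hc : lexLT e' e = true
        · have h1 : m1 = e' := by rw [hm1, if_pos hc]
          have h2 := ihh e' (by simp [h1])
          exact lexLT_ff_tt h2 hc
        · have hcf : lexLT e' e = false := by simpa using hc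
          have h1 : m1 = e := by rw [hm1, if_neg (by simp [hcf])]
          exact ihh e (by simp [h1])
      · rcases List.mem_cons.mp he2 with rfl | he3
        · by_cases hc : lexLT e h = true
          · have h1 : m1 = e := by rw [hm1, if_pos hc]
            exact ihh e (by simp [h1])
          · have hcf : lexLT e h = false := by simpa using hc
            have h1 : m1 = h := by rw [hm1, if_neg (by simp [hcf])]
            have h2 := ihh h (by simp [h1])
            exact lexLT_ff_trans h2 hcf
        · exact ihh e (by simp [he3])

theorem popMin_none {q : List (Int × Int)} : popMin q = none ↔ q = [] := by
  cases q <;> simp [popMin]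

theorem popMin_spec {q : List (Int × Int)} {m : Int × Int} {r : List (Int × Int)}
    (h : popMin q = some (m, r)) :
    m ∈ q ∧ (∀ e ∈ q, lexLT e m = false) ∧ r = q.erase m := by
  cases q with
  | nil => simp [popMin] at h
  | cons a t =>
      simp only [popMin] at h
      obtain ⟨h1, h2⟩ := Prod.mk.injEq .. ▸ (Option.some.injEq _ _ ▸ h)
      subst h1; subst h2
      exact ⟨foldl_min_mem t a, foldl_min_le t a, rfl⟩

-- ---------- Dijkstra loop invariant ----------

theorem getD_none_no_val {d : DDist} {v : Int} (h : d.getD v none = none) :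
    ∀ c, d.get? v ≠ some (some c) := by
  intro c hc
  rw [PySem.Dict.getD_eq_get?_getD, hc] at h
  simp at h

structure DInv (g : DGraph) (s : Int) (d : DDist) (q : List (Int × Int)) : Prop where
  keys : KeysOK g s d
  s0 : d.get? s = some (some 0)
  suppd : Supp g s d
  suppq : ∀ p ∈ q, Reach g s p.2 p.1
  dom : ∀ p ∈ q, ∃ c', d.get? p.2 = some (some c') ∧ c' ≤ p.1
  wit : ∀ x c', d.get? x = some (some c') → (c', x) ∈ q ∨ StabAt g d x
  fin : ∀ x c', d.get? x = some (some c') → (c', x) ∉ q → ∀ p ∈ q, c' ≤ p.1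
  nodupq : q.Nodup

structure MInv (g : DGraph) (s u c : Int) (d : DDist) (q : List (Int × Int)) : Prop where
  keys : KeysOK g s d
  s0 : d.get? s = some (some 0)
  suppd : Supp g s d
  suppq : ∀ p ∈ q, Reach g s p.2 p.1
  dom : ∀ p ∈ q, ∃ c', d.get? p.2 = some (some c') ∧ c' ≤ p.1
  witx : ∀ x c', d.get? x = some (some c') → x = u ∨ (c', x) ∈ q ∨ StabAt g d x
  fin : ∀ x c', d.get? x = some (some c') → (c', x) ∉ q → ∀ p ∈ q, c' ≤ p.1
  lowc : ∀ x c', d.get? x = some (some c') → (c', x) ∉ q → c' ≤ c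
  du : d.get? u = some (some c)
  notin : (c, u) ∉ q
  nodupq : q.Nodup

theorem relax_fold {g : DGraph} {s u c : Int} (H : GOK g) (hreach : Reach g s u c) :
    ∀ (its : List (Int × Int)) (d : DDist) (q : List (Int × Int)),
    (∀ p ∈ its, EdgeW g u p.1 p.2) → MInv g s u c d q →
    MInv g s u c (its.foldl (relaxA c) (d, q)).1 (its.foldl (relaxA c) (d, q)).2 ∧
    (∀ p ∈ its, ∃ cv, (its.foldl (relaxA c) (d, q)).1.get? p.1 = some (some cv) ∧ cv ≤ c + p.2) ∧
    (∀ x cx, d.get? x = some (some cx) → (cx, x) ∉ q →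
       (its.foldl (relaxA c) (d, q)).1.get? x = some (some cx) ∧ (cx, x) ∉ (its.foldl (relaxA c) (d, q)).2) ∧
    (∀ x cx, d.get? x = some (some cx) → ∃ cx', (its.foldl (relaxA c) (d, q)).1.get? x = some (some cx') ∧ cx' ≤ cx) ∧
    (its.foldl (relaxA c) (d, q)).2.length ≤ q.length + its.length ∧
    (∀ p ∈ q, p ∈ (its.foldl (relaxA c) (d, q)).2) := by
  intro its
  induction its with
  | nil =>
      intro d q hits hI
      refine ⟨hI, by simp, ?_, ?_, by simp, by simp⟩
      · intro x cx h1 h2; exact ⟨h1, h2⟩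
      · intro x cx h1; exact ⟨cx, h1, le_refl _⟩
  | cons it its' ih =>
      intro d q hits hI
      have hc0 : 0 ≤ c := by obtain ⟨l, hw⟩ := hreach; exact walk_nonneg H hw
      have hE : EdgeW g u it.1 it.2 := hits it (by simp)
      have hw0 : 0 ≤ it.2 := H.nonneg _ _ _ hE
      simp only [List.foldl_cons]
      by_cases hfire : oLT' (c + it.2) (d.getD it.1 none) = true
      · -- the relaxation fires
        have hstep : relaxA c (d, q) it =
            (d.insert it.1 (some (c + it.2)), (c + it.2, it.1) :: q) := by
          simp [relaxA, hfire]
        have hvne : it.1 ≠ u := by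
          intro hvu
          rw [hvu, PySem.Dict.getD_eq_get?_getD, hI.du] at hfire
          simp [oLT'] at hfire; omega
        have hvns : it.1 ≠ s := by
          intro hvs
          rw [hvs, PySem.Dict.getD_eq_get?_getD, hI.s0] at hfire
          simp [oLT'] at hfire; omega
        have hmemk : it.1 ∈ g.keys :=
          (PySem.Dict.contains_iff_mem_keys _ _).mp (H.closed _ _ _ hE)
        have hfirecase : d.getD it.1 none = none ∨
            (∃ dv, d.get? it.1 = some (some dv) ∧ c + it.2 < dv) := by
          cases hgd : d.getD it.1 none with
          | none => exact Or.inl rfl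
          | some dv =>
              rw [hgd] at hfire
              simp [oLT'] at hfire
              exact Or.inr ⟨dv, getD_none_some hgd, hfire⟩
        have hnotinq : (c + it.2, it.1) ∉ q := by
          intro hmem
          obtain ⟨c'', hc'', hle''⟩ := hI.dom _ hmem
          simp only at hc''
          rcases hfirecase with hcase | ⟨dv, hdv, hlt⟩
          · exact getD_none_no_val hcase c'' hc''
          · rw [hdv] at hc''; simp at hc''; omega
        have hI' : MInv g s u c (d.insert it.1 (some (c + it.2))) ((c + it.2, it.1) :: q) := by
          constructor
          · intro x
            rw [PySem.Dict.get?_insert]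
            by_cases hx : x = it.1
            · simp [hx, hmemk]
            · simp only [if_neg hx]; exact hI.keys x
          · rw [PySem.Dict.get?_insert, if_neg (fun h : s = it.1 => hvns h.symm)]
            exact hI.s0
          · intro x cx
            rw [PySem.Dict.get?_insert]
            by_cases hx : x = it.1
            · simp only [hx, if_pos rfl]
              intro hcx
              obtain ⟨l, hwl⟩ := hreach
              have heq : cx = c + it.2 := by simpa using hcx.symm
              exact heq ▸ ⟨l ++ [it.1], IsWalk.snoc hwl hE⟩
            · simp only [if_neg hx]; exact hI.suppd x cx
          · intro p hp
            rcases List.mem_cons.mp hp with rfl | hp2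
            · obtain ⟨l, hwl⟩ := hreach
              exact ⟨l ++ [it.1], IsWalk.snoc hwl hE⟩
            · exact hI.suppq p hp2
          · intro p hp
            rcases List.mem_cons.mp hp with rfl | hp2
            · exact ⟨c + it.2, by rw [PySem.Dict.get?_insert, if_pos rfl], le_refl _⟩
            · obtain ⟨c'', hc'', hle''⟩ := hI.dom p hp2
              by_cases hx : p.2 = it.1
              · rcases hfirecase with hcase | ⟨dv, hdv, hlt⟩
                · exact absurd (hx ▸ hc'') (getD_none_no_val (hx ▸ hcase) c'')
                · rw [hx] at hc''; rw [hdv] at hc''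
                  simp at hc''
                  refine ⟨c + it.2, by rw [hx, PySem.Dict.get?_insert, if_pos rfl], by omega⟩
              · exact ⟨c'', by rw [PySem.Dict.get?_insert, if_neg hx]; exact hc'', hle''⟩
          · intro x cx
            rw [PySem.Dict.get?_insert]
            by_cases hx : x = it.1
            · intro hcx
              have : cx = c + it.2 := by rw [if_pos hx] at hcx; simpa using hcx.symm
              exact Or.inr (Or.inl (by rw [this, hx]; exact List.mem_cons_self ..))
            · rw [if_neg hx]
              intro hcx
              rcases hI.witx x cx hcx with h1 | h2 | h3
              · exact Or.inl h1
              · exact Or.inr (Or.inl (List.mem_cons_of_mem _ h2))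
              · refine Or.inr (Or.inr ?_)
                intro v' w' cu' hE' hdx'
                rw [PySem.Dict.get?_insert, if_neg hx] at hdx'
                obtain ⟨cv, hcv, hlecv⟩ := h3 v' w' cu' hE' hdx'
                by_cases hv' : v' = it.1
                · subst hv'
                  rcases hfirecase with hcase | ⟨dv, hdv, hlt⟩
                  · exact absurd hcv (getD_none_no_val hcase cv)
                  · rw [hdv] at hcv; simp at hcv
                    refine ⟨c + it.2, by rw [PySem.Dict.get?_insert, if_pos rfl], by omega⟩
                · exact ⟨cv, by rw [PySem.Dict.get?_insert, if_neg hv']; exact hcv, hlecv⟩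
          · intro x cx hcx hnot p hp
            rw [PySem.Dict.get?_insert] at hcx
            by_cases hx : x = it.1
            · exfalso
              rw [if_pos hx] at hcx
              have : cx = c + it.2 := by simpa using hcx.symm
              exact hnot (by rw [this, hx]; exact List.mem_cons_self ..)
            · rw [if_neg hx] at hcx
              have hnq : (cx, x) ∉ q := fun hmem => hnot (List.mem_cons_of_mem _ hmem)
              rcases List.mem_cons.mp hp with rfl | hp2
              · have := hI.lowc x cx hcx hnq
                omega
              · exact hI.fin x cx hcx hnq p hp2
          · intro x cx hcx hnot
            rw [PySem.Dict.get?_insert] at hcx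
            by_cases hx : x = it.1
            · exfalso
              rw [if_pos hx] at hcx
              have : cx = c + it.2 := by simpa using hcx.symm
              exact hnot (by rw [this, hx]; exact List.mem_cons_self ..)
            · rw [if_neg hx] at hcx
              exact hI.lowc x cx hcx (fun hmem => hnot (List.mem_cons_of_mem _ hmem))
          · rw [PySem.Dict.get?_insert, if_neg (fun h => hvne h.symm)]
            exact hI.du
          · intro hmem
            rcases List.mem_cons.mp hmem with heq | hmem2
            · have := congrArg Prod.snd heq
              simp at this
              exact hvne this.symm
            · exact hI.notin hmem2
          · exact List.nodup_cons.mpr ⟨hnotinq, hI.nodupq⟩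
        have hres := ih (d.insert it.1 (some (c + it.2))) ((c + it.2, it.1) :: q)
          (fun p hp => hits p (List.mem_cons_of_mem _ hp)) hI'
        obtain ⟨r1, r2, r3, r4, r5, r6⟩ := hres
        rw [hstep]
        refine ⟨r1, ?_, ?_, ?_, ?_, ?_⟩
        · intro p hp
          rcases List.mem_cons.mp hp with rfl | hp2
          · obtain ⟨cx', hx', hle'⟩ := r4 p.1 (c + p.2)
              (by rw [PySem.Dict.get?_insert, if_pos rfl])
            exact ⟨cx', hx', by omega⟩
          · exact r2 p hp2
        · intro x cx hcx hnot
          by_cases hx : x = it.1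
          · exfalso
            have hcx' : d.get? it.1 = some (some cx) := by rw [← hx]; exact hcx
            rcases hfirecase with hcase | ⟨dv, hdv, hlt⟩
            · exact getD_none_no_val hcase cx hcx'
            · rw [hdv] at hcx'
              have hdc : dv = cx := by simpa using hcx'
              have hle := hI.lowc x cx hcx hnot
              omega
          · have h1 : (d.insert it.1 (some (c + it.2))).get? x = some (some cx) := by
              rw [PySem.Dict.get?_insert, if_neg hx]; exact hcx
            have h2 : (cx, x) ∉ (c + it.2, it.1) :: q := by
              intro hmem
              rcases List.mem_cons.mp hmem with heq | hmem2
              · exact hx (congrArg Prod.snd heq)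
              · exact hnot hmem2
            exact r3 x cx h1 h2
        · intro x cx hcx
          by_cases hx : x = it.1
          · have hcx' : d.get? it.1 = some (some cx) := by rw [← hx]; exact hcx
            rcases hfirecase with hcase | ⟨dv, hdv, hlt⟩
            · exact absurd hcx' (getD_none_no_val hcase cx)
            · rw [hdv] at hcx'
              have hdc : dv = cx := by simpa using hcx'
              rw [hx]
              obtain ⟨cx', hx', hle'⟩ := r4 it.1 (c + it.2)
                (by rw [PySem.Dict.get?_insert, if_pos rfl])
              exact ⟨cx', hx', by omega⟩
          · exact r4 x cx (by rw [PySem.Dict.get?_insert, if_neg hx]; exact hcx)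
        · simp at r5 ⊢; omega
        · intro p hp
          exact r6 p (List.mem_cons_of_mem _ hp)
      · -- no relaxation
        have hfiref : oLT' (c + it.2) (d.getD it.1 none) = false := by simpa using hfire
        have hstep : relaxA c (d, q) it = (d, q) := by
          simp [relaxA, hfiref]
        have hdvfact : ∃ dv, d.get? it.1 = some (some dv) ∧ dv ≤ c + it.2 := by
          cases hgd : d.getD it.1 none with
          | none => rw [hgd] at hfiref; simp [oLT'] at hfiref
          | some dv =>
              rw [hgd] at hfiref
              simp [oLT'] at hfiref
              exact ⟨dv, getD_none_some hgd, hfiref⟩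
        have hres := ih d q (fun p hp => hits p (List.mem_cons_of_mem _ hp)) hI
        obtain ⟨r1, r2, r3, r4, r5, r6⟩ := hres
        rw [hstep]
        refine ⟨r1, ?_, r3, r4, by simp at r5 ⊢; omega, r6⟩
        intro p hp
        rcases List.mem_cons.mp hp with rfl | hp2
        · obtain ⟨dv, hdv, hledv⟩ := hdvfact
          obtain ⟨cx', hx', hle'⟩ := r4 p.1 dv hdv
          exact ⟨cx', hx', by omega⟩
        · exact r2 p hp2

-- ---------- the termination potential ----------

def finB (d : DDist) (q : List (Int × Int)) (x : Int) : Bool :=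
  match d.get? x with
  | some (some cx) => decide ((cx, x) ∉ q)
  | _ => false

def degg (g : DGraph) (u : Int) : Nat :=
  match g.get? u with
  | some adj => adj.size
  | none => 0

def phi (g : DGraph) (d : DDist) (q : List (Int × Int)) : Nat :=
  q.length + ((g.keys.filter (fun x => ! finB d q x)).map (degg g)).sum

theorem filter_sum_mono (L : List Int) (f : Int → Nat) (p p' : Int → Bool)
    (h : ∀ x ∈ L, p x = true → p' x = true) :
    ((L.filter (fun x => ! p' x)).map f).sum ≤ ((L.filter (fun x => ! p x)).map f).sum := by
  induction L with
  | nil => simp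
  | cons a t ih =>
      have iht := ih (fun x hx hp => h x (List.mem_cons_of_mem _ hx) hp)
      by_cases hpa : p a = true
      · have hp'a := h a (by simp) hpa
        simp [List.filter_cons, hpa, hp'a, iht]
      · have hpaf : p a = false := by simpa using hpa
        by_cases hp'a : p' a = true
        · simp [List.filter_cons, hpaf, hp'a]
          omega
        · have hp'af : p' a = false := by simpa using hp'a
          simp [List.filter_cons, hpaf, hp'af]
          omega

theorem filter_sum_drop (L : List Int) (f : Int → Nat) (p p' : Int → Bool)
    (h : ∀ x ∈ L, p x = true → p' x = true) (u : Int) (hu : u ∈ L) (hnd : L.Nodup)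
    (hpu : p u = false) (hp'u : p' u = true) :
    ((L.filter (fun x => ! p' x)).map f).sum + f u ≤ ((L.filter (fun x => ! p x)).map f).sum := by
  induction L with
  | nil => simp at hu
  | cons a t ih =>
      obtain ⟨hna, hndt⟩ := List.nodup_cons.mp hnd
      rcases List.mem_cons.mp hu with rfl | hut
      · have hmono := filter_sum_mono t f p p' (fun x hx hp => h x (List.mem_cons_of_mem _ hx) hp)
        simp [List.filter_cons, hpu, hp'u]
        omega
      · have iht := ih (fun x hx hp => h x (List.mem_cons_of_mem _ hx) hp) hut hndt
        by_cases hpa : p a = true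
        · have hp'a := h a (by simp) hpa
          simp [List.filter_cons, hpa, hp'a]
          omega
        · have hpaf : p a = false := by simpa using hpa
          by_cases hp'a : p' a = true
          · simp [List.filter_cons, hpaf, hp'a]
            omega
          · have hp'af : p' a = false := by simpa using hp'a
            simp [List.filter_cons, hpaf, hp'af]
            omega

theorem filter_sum_le (L : List Int) (f : Int → Nat) (p : Int → Bool) :
    ((L.filter p).map f).sum ≤ (L.map f).sum := by
  induction L with
  | nil => simp
  | cons a t ih =>
      by_cases hpa : p a = true
      · simp [List.filter_cons, hpa]
        omega
      · have hpaf : p a = false := by simpa using hpa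
        simp [List.filter_cons, hpaf]
        omega

theorem keys_map_degg (g : DGraph) (h : g.keys.Nodup) :
    g.keys.map (degg g) = g.items.map (fun kv => kv.2.size) := by
  have h1 : g.keys = g.items.map Prod.fst := by simp [PySem.Dict.keys]
  rw [h1, List.map_map]
  apply List.map_congr_left
  intro kv hkv
  have := PySem.Dict.get?_of_mem_items g (k := kv.1) (v := kv.2) (by simpa using hkv) h
  simp [degg, this, Function.comp]

-- ---------- the Dijkstra loop ----------

structure DFinal (g : DGraph) (s : Int) (d : DDist) : Prop where
  keys : KeysOK g s d
  s0 : d.get? s = some (some 0)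
  suppd : Supp g s d
  stab : ∀ x, StabAt g d x

theorem dijLoop_final {g : DGraph} {s : Int} (H : GOK g) :
    ∀ (fuel : Nat) (d : DDist) (q : List (Int × Int)), DInv g s d q → phi g d q < fuel →
    DFinal g s (dijLoop g fuel (d, q)) := by
  intro fuel
  induction fuel with
  | zero => intro d q hI hphi; omega
  | succ fuel ih =>
      intro d q hI hphi
      cases hpop : popMin q with
      | none =>
          have : dijLoop g (fuel + 1) (d, q) = d := by simp [dijLoop, hpop]
          rw [this]
          have hq : q = [] := popMin_none.mp hpop
          refine ⟨hI.keys, hI.s0, hI.suppd, ?_⟩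
          intro x v w cu hE hdx
          rcases hI.wit x cu hdx with hmem | hstab
          · rw [hq] at hmem; simp at hmem
          · exact hstab v w cu hE hdx
      | some mr =>
          obtain ⟨⟨c, u⟩, q'⟩ := mr
          obtain ⟨hmem, hmin, hq'⟩ := popMin_spec hpop
          have hnodupq' : q'.Nodup := hq' ▸ hI.nodupq.erase _
          have hlenq' : q'.length = q.length - 1 := hq' ▸ List.length_erase_of_mem hmem
          have hlenq : 1 ≤ q.length := List.length_pos_of_mem hmem
          have hsubq' : ∀ p, p ∈ q' → p ∈ q := by
            intro p hp; rw [hq'] at hp; exact List.mem_of_mem_erase hp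
          have hmemq' : ∀ p, p ∈ q → p ≠ (c, u) → p ∈ q' := by
            intro p hp hne
            rw [hq']
            exact (hI.nodupq.mem_erase_iff).mpr ⟨hne, hp⟩
          have hcu_notin : (c, u) ∉ q' := by
            intro hmm
            rw [hq'] at hmm
            exact ((hI.nodupq.mem_erase_iff).mp hmm).1 rfl
          by_cases hlt : oLT (d.getD u none) c = true
          · -- stale entry: distances[u] < c, skip
            have hrw : dijLoop g (fuel + 1) (d, q) = dijLoop g fuel (d, q') := by
              simp [dijLoop, hpop, hlt]
            rw [hrw]
            obtain ⟨cu, hcu, hcult⟩ : ∃ cu, d.get? u = some (some cu) ∧ cu < c := by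
              cases hgd : d.getD u none with
              | none => rw [hgd] at hlt; simp [oLT] at hlt
              | some cu =>
                  rw [hgd] at hlt; simp [oLT] at hlt
                  exact ⟨cu, getD_none_some hgd, hlt⟩
            have hne_cu : ∀ x c', d.get? x = some (some c') → (c', x) ≠ (c, u) := by
              intro x c' hdx heq
              have hxu : x = u := congrArg Prod.snd heq
              have hcc : c' = c := congrArg Prod.fst heq
              rw [hxu] at hdx
              rw [hcu] at hdx
              simp at hdx
              omega
            have hI' : DInv g s d q' := by
              refine ⟨hI.keys, hI.s0, hI.suppd, fun p hp => hI.suppq p (hsubq' p hp),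
                fun p hp => hI.dom p (hsubq' p hp), ?_, ?_, hnodupq'⟩
              · intro x c' hdx
                rcases hI.wit x c' hdx with hmm | hstab
                · exact Or.inl (hmemq' _ hmm (hne_cu x c' hdx))
                · exact Or.inr hstab
              · intro x c' hdx hnot p hp
                have hnotq : (c', x) ∉ q := by
                  intro hq0
                  exact hnot (hmemq' _ hq0 (hne_cu x c' hdx))
                exact hI.fin x c' hdx hnotq p (hsubq' p hp)
            have hfinB : ∀ x, finB d q' x = finB d q x := by
              intro x
              unfold finB
              cases hdx : d.get? x with
              | none => rfl
              | some o =>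
                  cases o with
                  | none => rfl
                  | some cx =>
                      show decide ((cx, x) ∉ q') = decide ((cx, x) ∉ q)
                      rw [decide_eq_decide]
                      constructor
                      · intro hn hq0; exact hn (hmemq' _ hq0 (hne_cu x cx hdx))
                      · intro hn hq0; exact hn (hsubq' _ hq0)
            have hphi' : phi g d q' < fuel := by
              have hcong : g.keys.filter (fun x => ! finB d q' x)
                  = g.keys.filter (fun x => ! finB d q x) := by
                apply List.filter_congr
                intro x _
                rw [hfinB x]
              unfold phi at hphi ⊢
              rw [hcong]
              omega
            exact ih d q' hI' hphi'
          · -- fresh entry: distances[u] = c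
            have hltf : oLT (d.getD u none) c = false := by simpa using hlt
            obtain ⟨cu', hdu0, hle0⟩ := hI.dom (c, u) hmem
            have hdu : d.get? u = some (some c) := by
              have hgd := get?_some_getD hdu0
              rw [hgd] at hltf
              simp [oLT] at hltf
              have : cu' = c := by omega
              rw [← this]
              exact hdu0
            have hfin_u : ∀ p ∈ q', c ≤ p.1 := by
              intro p hp
              exact lexLT_false_fst (hmin p (hsubq' p hp))
            have hne_cu : ∀ x c', d.get? x = some (some c') → (c', x) ≠ (c, u) → ((c', x) ∈ q → (c', x) ∈ q') := by
              intro x c' _ hne hq0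
              exact hmemq' _ hq0 hne
            cases hgu : g.get? u with
            | none =>
                -- Python would raise KeyError here (excluded by Pre_); the port skips
                have hrw : dijLoop g (fuel + 1) (d, q) = dijLoop g fuel (d, q') := by
                  simp [dijLoop, hpop, hltf, hgu]
                rw [hrw]
                have hI' : DInv g s d q' := by
                  refine ⟨hI.keys, hI.s0, hI.suppd, fun p hp => hI.suppq p (hsubq' p hp),
                    fun p hp => hI.dom p (hsubq' p hp), ?_, ?_, hnodupq'⟩
                  · intro x c' hdx
                    by_cases hne : (c', x) = (c, u)
                    · refine Or.inr ?_
                      intro v w cu'' hE _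
                      obtain ⟨adj, hadj, _⟩ := hE
                      have hxu : x = u := congrArg Prod.snd hne
                      rw [hxu, hgu] at hadj
                      simp at hadj
                    · rcases hI.wit x c' hdx with hmm | hstab
                      · exact Or.inl (hmemq' _ hmm hne)
                      · exact Or.inr hstab
                  · intro x c' hdx hnot p hp
                    by_cases hne : (c', x) = (c, u)
                    · have hcc : c' = c := congrArg Prod.fst hne
                      rw [hcc]
                      exact hfin_u p hp
                    · have hnotq : (c', x) ∉ q := fun hq0 => hnot (hmemq' _ hq0 hne)
                      exact hI.fin x c' hdx hnotq p (hsubq' p hp)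
                have hunk : u ∉ g.keys := (PySem.Dict.get?_eq_none_iff_not_mem_keys g u).mp hgu
                have hfinB : ∀ x ∈ g.keys, finB d q' x = finB d q x := by
                  intro x hx
                  unfold finB
                  cases hdx : d.get? x with
                  | none => rfl
                  | some o =>
                      cases o with
                      | none => rfl
                      | some cx =>
                          show decide ((cx, x) ∉ q') = decide ((cx, x) ∉ q)
                          rw [decide_eq_decide]
                          have hne : (cx, x) ≠ (c, u) := by
                            intro heq
                            have hxu : x = u := congrArg Prod.snd heq
                            rw [hxu] at hx
                            exact hunk hx
                          constructor
                          · intro hn hq0; exact hn (hmemq' _ hq0 hne)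
                          · intro hn hq0; exact hn (hsubq' _ hq0)
                have hphi' : phi g d q' < fuel := by
                  have hcong : g.keys.filter (fun x => ! finB d q' x)
                      = g.keys.filter (fun x => ! finB d q x) := by
                    apply List.filter_congr
                    intro x hx
                    rw [hfinB x hx]
                  unfold phi at hphi ⊢
                  rw [hcong]
                  omega
                exact ih d q' hI' hphi'
            | some adj =>
                have hrw : dijLoop g (fuel + 1) (d, q) =
                    dijLoop g fuel (adj.items.foldl (relaxA c) (d, q')) := by
                  simp [dijLoop, hpop, hltf, hgu]
                rw [hrw]
                have hits : ∀ p ∈ adj.items, EdgeW g u p.1 p.2 := by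
                  intro p hp
                  refine ⟨adj, hgu, ?_⟩
                  exact PySem.Dict.get?_of_mem_items adj (by simpa using hp) (H.inner u adj hgu)
                have hreach : Reach g s u c := hI.suppd u c hdu
                have hM : MInv g s u c d q' := by
                  refine ⟨hI.keys, hI.s0, hI.suppd, fun p hp => hI.suppq p (hsubq' p hp),
                    fun p hp => hI.dom p (hsubq' p hp), ?_, ?_, ?_, hdu, hcu_notin, hnodupq'⟩
                  · intro x c' hdx
                    by_cases hxu : x = u
                    · exact Or.inl hxu
                    · have hne : (c', x) ≠ (c, u) := by
                        intro heq; exact hxu (congrArg Prod.snd heq)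
                      rcases hI.wit x c' hdx with hmm | hstab
                      · exact Or.inr (Or.inl (hmemq' _ hmm hne))
                      · exact Or.inr (Or.inr hstab)
                  · intro x c' hdx hnot p hp
                    by_cases hne : (c', x) = (c, u)
                    · have hcc : c' = c := congrArg Prod.fst hne
                      rw [hcc]
                      exact hfin_u p hp
                    · have hnotq : (c', x) ∉ q := fun hq0 => hnot (hmemq' _ hq0 hne)
                      exact hI.fin x c' hdx hnotq p (hsubq' p hp)
                  · intro x c' hdx hnot
                    by_cases hne : (c', x) = (c, u)
                    · have hcc : c' = c := congrArg Prod.fst hne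
                      omega
                    · have hnotq : (c', x) ∉ q := fun hq0 => hnot (hmemq' _ hq0 hne)
                      exact hI.fin x c' hdx hnotq (c, u) hmem
                obtain ⟨m1, m2, m3, m4, m5, m6⟩ := relax_fold H hreach adj.items d q' hits hM
                have hDI : DInv g s (adj.items.foldl (relaxA c) (d, q')).1
                    (adj.items.foldl (relaxA c) (d, q')).2 := by
                  refine ⟨m1.keys, m1.s0, m1.suppd, m1.suppq, m1.dom, ?_, m1.fin, m1.nodupq⟩
                  intro x c' hdx
                  rcases m1.witx x c' hdx with hxu | hmm | hstab
                  · refine Or.inr ?_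
                    intro v w cu'' hE hdu'
                    rw [hxu] at hdu'
                    rw [m1.du] at hdu'
                    have hc'' : cu'' = c := by simpa using hdu'.symm
                    obtain ⟨adj2, hadj2, hav⟩ := hE
                    rw [hxu, hgu] at hadj2
                    have hadj2' : adj2 = adj := by simpa using hadj2.symm
                    rw [hadj2'] at hav
                    have hmemit : (v, w) ∈ adj.items := PySem.Dict.mem_items_of_get?_eq_some adj hav
                    obtain ⟨cv, hcv, hlecv⟩ := m2 (v, w) hmemit
                    exact ⟨cv, hcv, by rw [hc'']; exact hlecv⟩
                  · exact Or.inl hmm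
                  · exact Or.inr hstab
                have humem : u ∈ g.keys := by
                  by_contra hk
                  rw [← PySem.Dict.get?_eq_none_iff_not_mem_keys] at hk
                  rw [hgu] at hk
                  simp at hk
                have hmono : ∀ x ∈ g.keys, finB d q x = true →
                    finB (adj.items.foldl (relaxA c) (d, q')).1 (adj.items.foldl (relaxA c) (d, q')).2 x = true := by
                  intro x _ hx
                  unfold finB at hx
                  cases hdx : d.get? x with
                  | none => rw [hdx] at hx; simp at hx
                  | some o =>
                      cases o with
                      | none => rw [hdx] at hx; simp at hx
                      | some cx =>
                          rw [hdx] at hx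
                          simp only [decide_eq_true_eq] at hx
                          have hnq' : (cx, x) ∉ q' := fun hq0 => hx (hsubq' _ hq0)
                          obtain ⟨hget, hnot⟩ := m3 x cx hdx hnq'
                          unfold finB
                          rw [hget]
                          simpa using hnot
                have hfB_u_old : finB d q u = false := by
                  unfold finB
                  rw [hdu]
                  simpa using hmem
                have hfB_u_new : finB (adj.items.foldl (relaxA c) (d, q')).1
                    (adj.items.foldl (relaxA c) (d, q')).2 u = true := by
                  obtain ⟨hget, hnot⟩ := m3 u c hdu hcu_notin
                  unfold finB
                  rw [hget]
                  simpa using hnot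
                have hsum := filter_sum_drop g.keys (degg g) (finB d q)
                  (finB (adj.items.foldl (relaxA c) (d, q')).1 (adj.items.foldl (relaxA c) (d, q')).2)
                  hmono u humem H.nodup hfB_u_old hfB_u_new
                have hdeg : degg g u = adj.items.length := by
                  simp [degg, hgu, PySem.Dict.size]
                have hphi' : phi g (adj.items.foldl (relaxA c) (d, q')).1
                    (adj.items.foldl (relaxA c) (d, q')).2 < fuel := by
                  unfold phi at hphi ⊢
                  rw [hdeg] at hsum
                  omega
                exact ih _ _ hDI hphi'

theorem dij_init_inv {g : DGraph} (H : GOK g) (s : Int) :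
    DInv g s (initDist g s) [(0, s)] := by
  refine ⟨initDist_keysOK g s, initDist_s0 g s, initDist_supp g s, ?_, ?_, ?_, ?_, by simp⟩
  · intro p hp
    simp at hp
    rw [hp]
    exact ⟨[s], IsWalk.nil⟩
  · intro p hp
    simp at hp
    rw [hp]
    exact ⟨0, initDist_s0 g s, le_refl _⟩
  · intro x c' hdx
    rw [initDist_get?] at hdx
    by_cases h1 : x = s
    · rw [if_pos h1] at hdx
      have : c' = 0 := by simpa using hdx.symm
      rw [this, h1]
      exact Or.inl (by simp)
    · rw [if_neg h1] at hdx
      by_cases h2 : x ∈ g.keys <;> simp [h2] at hdx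
  · intro x c' hdx hnot
    rw [initDist_get?] at hdx
    by_cases h1 : x = s
    · rw [if_pos h1] at hdx
      have : c' = 0 := by simpa using hdx.symm
      exact absurd (by simp [this, h1]) hnot
    · rw [if_neg h1] at hdx
      by_cases h2 : x ∈ g.keys <;> simp [h2] at hdx

theorem dij_phi_init {g : DGraph} (H : GOK g) (s : Int) :
    phi g (initDist g s) [(0, s)] < dijFuel g := by
  unfold phi dijFuel
  have h1 := filter_sum_le g.keys (degg g) (fun x => ! finB (initDist g s) [(0, s)] x)
  rw [keys_map_degg g H.nodup] at h1
  simp only [List.length_cons, List.length_nil]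
  omega

theorem dijkstra_resOK {g : DGraph} (H : GOK g) (s : Int) : ResOK g s (dijkstra g s) := by
  unfold dijkstra
  have h := dijLoop_final H (dijFuel g) (initDist g s) [(0, s)]
    (dij_init_inv H s) (dij_phi_init H s)
  exact final_resOK H h.keys h.suppd h.s0 h.stab

-- ---------- the Bellman-Ford side ----------

structure BInv (g : DGraph) (s : Int) (d : DDist) : Prop where
  keys : KeysOK g s d
  s0 : d.get? s = some (some 0)
  suppd : Supp g s d

def DLEp (d' d : DDist) : Prop :=
  (∀ v, (d'.get? v).isSome = (d.get? v).isSome) ∧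
  (∀ v c, d.get? v = some (some c) → ∃ c', d'.get? v = some (some c') ∧ c' ≤ c)

theorem DLEp_refl (d : DDist) : DLEp d d :=
  ⟨fun _ => rfl, fun v c h => ⟨c, h, le_refl _⟩⟩

theorem DLEp_trans {d1 d2 d3 : DDist} (h1 : DLEp d1 d2) (h2 : DLEp d2 d3) : DLEp d1 d3 := by
  refine ⟨fun v => (h1.1 v).trans (h2.1 v), ?_⟩
  intro v c h
  obtain ⟨c', hc', hle'⟩ := h2.2 v c h
  obtain ⟨c'', hc'', hle''⟩ := h1.2 v c' hc'
  exact ⟨c'', hc'', by omega⟩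

theorem relaxB_flag_mono {du : Int} :
    ∀ (its : List (Int × Int)) (st : DDist × Bool), st.2 = true →
    (its.foldl (relaxB du) st).2 = true := by
  intro its
  induction its with
  | nil => intro st h; exact h
  | cons it its' ih =>
      intro st h
      simp only [List.foldl_cons]
      apply ih
      unfold relaxB
      split
      · rfl
      · exact h

theorem relaxB_fold {g : DGraph} {s u du : Int} (H : GOK g) (hreach : Reach g s u du) :
    ∀ (its : List (Int × Int)) (d : DDist) (fl : Bool),
    (∀ p ∈ its, EdgeW g u p.1 p.2) → BInv g s d →
    BInv g s (its.foldl (relaxB du) (d, fl)).1 ∧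
    DLEp (its.foldl (relaxB du) (d, fl)).1 d ∧
    (∀ p ∈ its, ∃ cv, (its.foldl (relaxB du) (d, fl)).1.get? p.1 = some (some cv) ∧ cv ≤ du + p.2) := by
  intro its
  induction its with
  | nil =>
      intro d fl hits hB
      exact ⟨hB, DLEp_refl d, by simp⟩
  | cons it its' ih =>
      intro d fl hits hB
      have hdu0 : 0 ≤ du := by obtain ⟨l, hw⟩ := hreach; exact walk_nonneg H hw
      have hE : EdgeW g u it.1 it.2 := hits it (by simp)
      have hw0 : 0 ≤ it.2 := H.nonneg _ _ _ hE
      simp only [List.foldl_cons]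
      by_cases hfire : oLT' (du + it.2) (d.getD it.1 none) = true
      · have hstep : relaxB du (d, fl) it = (d.insert it.1 (some (du + it.2)), true) := by
          simp [relaxB, hfire]
        have hvns : it.1 ≠ s := by
          intro hvs
          rw [hvs, PySem.Dict.getD_eq_get?_getD, hB.s0] at hfire
          simp [oLT'] at hfire; omega
        have hmemk : it.1 ∈ g.keys :=
          (PySem.Dict.contains_iff_mem_keys _ _).mp (H.closed _ _ _ hE)
        have hB' : BInv g s (d.insert it.1 (some (du + it.2))) := by
          refine ⟨?_, ?_, ?_⟩
          · intro x
            rw [PySem.Dict.get?_insert]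
            by_cases hx : x = it.1
            · simp [hx, hmemk]
            · simp only [if_neg hx]; exact hB.keys x
          · rw [PySem.Dict.get?_insert, if_neg (fun h => hvns h.symm)]
            exact hB.s0
          · intro x cx
            rw [PySem.Dict.get?_insert]
            by_cases hx : x = it.1
            · simp only [hx, if_pos rfl]
              intro hcx
              obtain ⟨l, hwl⟩ := hreach
              have heq : cx = du + it.2 := by simpa using hcx.symm
              exact heq ▸ ⟨l ++ [it.1], IsWalk.snoc hwl hE⟩
            · simp only [if_neg hx]; exact hB.suppd x cx
        have hDLE1 : DLEp (d.insert it.1 (some (du + it.2))) d := by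
          constructor
          · intro v
            rw [PySem.Dict.get?_insert]
            by_cases hx : v = it.1
            · rw [if_pos hx, hx]
              have hs := (hB.keys it.1).mpr (Or.inl hmemk)
              simp [hs]
            · simp [if_neg hx]
          · intro v cv hcv
            rw [PySem.Dict.get?_insert]
            by_cases hx : v = it.1
            · rw [if_pos hx]
              have hcv' : d.get? it.1 = some (some cv) := by rw [← hx]; exact hcv
              cases hgd : d.getD it.1 none with
              | none => exact absurd hcv' (getD_none_no_val hgd cv)
              | some dv =>
                  rw [hgd] at hfire
                  simp [oLT'] at hfire
                  have hdveq : dv = cv := by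
                    have h0 := getD_none_some hgd
                    rw [hcv'] at h0
                    simpa using h0.symm
                  exact ⟨du + it.2, rfl, by omega⟩
            · exact ⟨cv, by rw [if_neg hx]; exact hcv, le_refl _⟩
        obtain ⟨r1, r2, r3⟩ := ih (d.insert it.1 (some (du + it.2))) true
          (fun p hp => hits p (List.mem_cons_of_mem _ hp)) hB'
        rw [hstep]
        refine ⟨r1, DLEp_trans r2 hDLE1, ?_⟩
        intro p hp
        rcases List.mem_cons.mp hp with rfl | hp2
        · obtain ⟨cv, hcv, hlecv⟩ := r2.2 p.1 (du + p.2)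
            (by rw [PySem.Dict.get?_insert, if_pos rfl])
          exact ⟨cv, hcv, by omega⟩
        · exact r3 p hp2
      · have hfiref : oLT' (du + it.2) (d.getD it.1 none) = false := by simpa using hfire
        have hstep : relaxB du (d, fl) it = (d, fl) := by simp [relaxB, hfiref]
        have hdvfact : ∃ dv, d.get? it.1 = some (some dv) ∧ dv ≤ du + it.2 := by
          cases hgd : d.getD it.1 none with
          | none => rw [hgd] at hfiref; simp [oLT'] at hfiref
          | some dv =>
              rw [hgd] at hfiref
              simp [oLT'] at hfiref
              exact ⟨dv, getD_none_some hgd, hfiref⟩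
        obtain ⟨r1, r2, r3⟩ := ih d fl (fun p hp => hits p (List.mem_cons_of_mem _ hp)) hB
        rw [hstep]
        refine ⟨r1, r2, ?_⟩
        intro p hp
        rcases List.mem_cons.mp hp with rfl | hp2
        · obtain ⟨dv, hdv, hledv⟩ := hdvfact
          obtain ⟨cv, hcv, hlecv⟩ := r2.2 p.1 dv hdv
          exact ⟨cv, hcv, by omega⟩
        · exact r3 p hp2

theorem relaxB_fold_nochange {du : Int} :
    ∀ (its : List (Int × Int)) (d : DDist),
    (its.foldl (relaxB du) (d, false)).2 = false →
    its.foldl (relaxB du) (d, false) = (d, false) ∧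
    (∀ p ∈ its, oLT' (du + p.2) (d.getD p.1 none) = false) := by
  intro its
  induction its with
  | nil => intro d h; exact ⟨rfl, by simp⟩
  | cons it its' ih =>
      intro d h
      simp only [List.foldl_cons] at h ⊢
      by_cases hfire : oLT' (du + it.2) (d.getD it.1 none) = true
      · exfalso
        have hstep : relaxB du (d, false) it = (d.insert it.1 (some (du + it.2)), true) := by
          simp [relaxB, hfire]
        rw [hstep] at h
        rw [relaxB_flag_mono its' _ rfl] at h
        simp at h
      · have hfiref : oLT' (du + it.2) (d.getD it.1 none) = false := by simpa using hfire
        have hstep : relaxB du (d, false) it = (d, false) := by simp [relaxB, hfiref]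
        rw [hstep] at h ⊢
        obtain ⟨h1, h2⟩ := ih d h
        refine ⟨h1, ?_⟩
        intro p hp
        rcases List.mem_cons.mp hp with rfl | hp2
        · exact hfiref
        · exact h2 p hp2

def passStep (st : DDist × Bool) (kv : Int × DAdj) : DDist × Bool :=
  match st.1.getD kv.1 none with
  | none => st
  | some du => kv.2.items.foldl (relaxB du) st

theorem passB_eq (g : DGraph) (st : DDist × Bool) :
    passB g st = g.items.foldl passStep st := by
  rfl

theorem passStep_flag_mono (kv : Int × DAdj) (st : DDist × Bool) (h : st.2 = true) :
    (passStep st kv).2 = true := by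
  unfold passStep
  cases st.1.getD kv.1 none with
  | none => exact h
  | some du => exact relaxB_flag_mono _ _ h

theorem pass_fold_flag_mono : ∀ (L : List (Int × DAdj)) (st : DDist × Bool), st.2 = true →
    (L.foldl passStep st).2 = true := by
  intro L
  induction L with
  | nil => intro st h; exact h
  | cons kv L' ih =>
      intro st h
      simp only [List.foldl_cons]
      exact ih _ (passStep_flag_mono kv st h)

theorem pass_fold_spec {g : DGraph} {s : Int} (H : GOK g) :
    ∀ (L : List (Int × DAdj)) (d0 : DDist) (st : DDist × Bool),
    (∀ kv ∈ L, g.get? kv.1 = some kv.2) → BInv g s st.1 → DLEp st.1 d0 →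
    BInv g s (L.foldl passStep st).1 ∧
    DLEp (L.foldl passStep st).1 d0 ∧
    (∀ kv ∈ L, ∀ p ∈ kv.2.items, ∀ cu, d0.get? kv.1 = some (some cu) →
      ∃ cv, (L.foldl passStep st).1.get? p.1 = some (some cv) ∧ cv ≤ cu + p.2) := by
  intro L
  induction L with
  | nil =>
      intro d0 st hL hB hD
      exact ⟨hB, hD, by simp⟩
  | cons kv L' ih =>
      intro d0 st hL hB hD
      simp only [List.foldl_cons]
      have hgkv : g.get? kv.1 = some kv.2 := hL kv (by simp)
      have hits : ∀ p ∈ kv.2.items, EdgeW g kv.1 p.1 p.2 := by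
        intro p hp
        exact ⟨kv.2, hgkv, PySem.Dict.get?_of_mem_items kv.2 (by simpa using hp) (H.inner _ _ hgkv)⟩
      cases hgd : st.1.getD kv.1 none with
      | none =>
          have hstep : passStep st kv = st := by unfold passStep; rw [hgd]
          rw [hstep]
          obtain ⟨r1, r2, r3⟩ := ih d0 st (fun kv' h => hL kv' (List.mem_cons_of_mem _ h)) hB hD
          refine ⟨r1, r2, ?_⟩
          intro kv' hkv' p hp cu hcu
          rcases List.mem_cons.mp hkv' with heq | hkv2
          · exfalso
            rw [heq] at hcu
            obtain ⟨c', hc', _⟩ := hD.2 kv.1 cu hcu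
            exact getD_none_no_val hgd c' hc'
          · exact r3 kv' hkv2 p hp cu hcu
      | some du =>
          have hstep : passStep st kv = kv.2.items.foldl (relaxB du) st := by
            unfold passStep; rw [hgd]
          rw [hstep]
          have hdu : st.1.get? kv.1 = some (some du) := getD_none_some hgd
          have hreach : Reach g s kv.1 du := hB.suppd kv.1 du hdu
          have hst : (st.1, st.2) = st := rfl
          obtain ⟨f1, f2, f3⟩ := relaxB_fold H hreach kv.2.items st.1 st.2 hits hB
          rw [hst] at f1 f2 f3
          obtain ⟨r1, r2, r3⟩ := ih d0 (kv.2.items.foldl (relaxB du) st)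
            (fun kv' h => hL kv' (List.mem_cons_of_mem _ h)) f1 (DLEp_trans f2 hD)
          refine ⟨r1, r2, ?_⟩
          intro kv' hkv' p hp cu hcu
          rcases List.mem_cons.mp hkv' with heq | hkv2
          · rw [heq] at hp hcu
            obtain ⟨cv, hcv, hlecv⟩ := f3 p hp
            obtain ⟨_, r2', _⟩ := ih (kv.2.items.foldl (relaxB du) st).1
              (kv.2.items.foldl (relaxB du) st)
              (fun kv'' h => hL kv'' (List.mem_cons_of_mem _ h)) f1 (DLEp_refl _)
            obtain ⟨cv', hcv', hlecv'⟩ := r2'.2 p.1 cv hcv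
            obtain ⟨du', hdu', hledu'⟩ := hD.2 kv.1 cu hcu
            have hdd : du = du' := by
              rw [hdu] at hdu'; simpa using hdu'
            exact ⟨cv', hcv', by omega⟩
          · exact r3 kv' hkv2 p hp cu hcu

theorem pass_fold_nochange :
    ∀ (L : List (Int × DAdj)) (d : DDist),
    (L.foldl passStep (d, false)).2 = false →
    L.foldl passStep (d, false) = (d, false) ∧
    (∀ kv ∈ L, ∀ du, d.getD kv.1 none = some du →
      ∀ p ∈ kv.2.items, oLT' (du + p.2) (d.getD p.1 none) = false) := by
  intro L
  induction L with
  | nil => intro d h; exact ⟨rfl, by simp⟩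
  | cons kv L' ih =>
      intro d h
      simp only [List.foldl_cons] at h ⊢
      cases hgd : d.getD kv.1 none with
      | none =>
          have hstep : passStep (d, false) kv = (d, false) := by unfold passStep; rw [hgd]
          rw [hstep] at h ⊢
          obtain ⟨h1, h2⟩ := ih d h
          refine ⟨h1, ?_⟩
          intro kv' hkv' du hdu p hp
          rcases List.mem_cons.mp hkv' with heq | hkv2
          · rw [heq, hgd] at hdu; simp at hdu
          · exact h2 kv' hkv2 du hdu p hp
      | some du =>
          have hstep : passStep (d, false) kv = kv.2.items.foldl (relaxB du) (d, false) := by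
            unfold passStep; rw [hgd]
          rw [hstep] at h ⊢
          have hflag : (kv.2.items.foldl (relaxB du) (d, false)).2 = false := by
            by_contra hc
            have : (kv.2.items.foldl (relaxB du) (d, false)).2 = true := by
              cases hx : (kv.2.items.foldl (relaxB du) (d, false)).2
              · exact absurd hx hc
              · rfl
            rw [pass_fold_flag_mono L' _ this] at h
            simp at h
          obtain ⟨hinner, hfails⟩ := relaxB_fold_nochange kv.2.items d hflag
          rw [hinner] at h ⊢
          obtain ⟨h1, h2⟩ := ih d h
          refine ⟨h1, ?_⟩
          intro kv' hkv' du' hdu' p hp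
          rcases List.mem_cons.mp hkv' with heq | hkv2
          · rw [heq] at hdu' hp
            have hdd : du' = du := by rw [hgd] at hdu'; simpa using hdu'.symm
            rw [hdd]
            exact hfails p hp
          · exact h2 kv' hkv2 du' hdu' p hp

theorem passB_nochange_stab {g : DGraph} {d : DDist} (H : GOK g)
    (hch : (passB g (d, false)).2 = false) :
    (passB g (d, false)).1 = d ∧ ∀ x, StabAt g d x := by
  rw [passB_eq] at hch ⊢
  obtain ⟨h1, h2⟩ := pass_fold_nochange g.items d hch
  refine ⟨by rw [h1], ?_⟩
  intro x v w cx hE hdx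
  obtain ⟨adj, hadj, hav⟩ := hE
  have hmem : (x, adj) ∈ g.items := PySem.Dict.mem_items_of_get?_eq_some g hadj
  have hgdx : d.getD x none = some cx := get?_some_getD hdx
  have hmemv : (v, w) ∈ adj.items := PySem.Dict.mem_items_of_get?_eq_some adj hav
  have := h2 (x, adj) hmem cx hgdx (v, w) hmemv
  cases hgv : d.getD v none with
  | none => rw [hgv] at this; simp [oLT'] at this
  | some dv =>
      rw [hgv] at this
      simp [oLT'] at this
      exact ⟨dv, getD_none_some hgv, this⟩

theorem pass_upto {g : DGraph} {s : Int} {d : DDist} {j : Nat} (H : GOK g)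
    (hB : BInv g s d) (hU : Upto g s j d) : Upto g s (j + 1) (passB g (d, false)).1 := by
  intro v c l hw hlen
  rw [passB_eq]
  obtain ⟨r1, r2, r3⟩ := pass_fold_spec H g.items d (d, false)
    (fun kv hkv => PySem.Dict.get?_of_mem_items g (by simpa using hkv) H.nodup)
    hB (DLEp_refl d)
  rcases walk_inv hw with ⟨hv, hc, hl⟩ | ⟨u, w', c'', l', hw', he, hc, hl⟩
  · rw [hv, hc]
    exact ⟨0, r1.s0, le_refl _⟩
  · subst hc
    subst hl
    by_cases hshort : l'.length ≤ j + 1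
    · obtain ⟨cu, hcu, hlecu⟩ := hU u c'' l' hw' hshort
      obtain ⟨adj, hadj, hav⟩ := he
      have hmemu : (u, adj) ∈ g.items := PySem.Dict.mem_items_of_get?_eq_some g hadj
      have hmemv : (v, w') ∈ adj.items := PySem.Dict.mem_items_of_get?_eq_some adj hav
      obtain ⟨cv, hcv, hlecv⟩ := r3 (u, adj) hmemu (v, w') hmemv cu hcu
      exact ⟨cv, hcv, by omega⟩
    · exfalso
      simp at hlen hshort
      omega

theorem bfLoop_resOK {g : DGraph} {s : Int} (H : GOK g) :
    ∀ (fuel : Nat) (j : Nat) (d : DDist), BInv g s d → Upto g s j d →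
    g.size ≤ fuel + j → ResOK g s (bfLoop g fuel d) := by
  intro fuel
  induction fuel with
  | zero =>
      intro j d hB hU hj
      have : bfLoop g 0 d = d := rfl
      rw [this]
      exact upto_resOK H hB.keys hB.suppd (by omega) hU
  | succ fuel ih =>
      intro j d hB hU hj
      have hrw : bfLoop g (fuel + 1) d =
          (if (passB g (d, false)).2 then bfLoop g fuel (passB g (d, false)).1
           else (passB g (d, false)).1) := by
        simp [bfLoop]
      rw [hrw]
      by_cases hch : (passB g (d, false)).2 = true
      · rw [if_pos hch]
        obtain ⟨r1, r2, r3⟩ := pass_fold_spec H g.items d (d, false)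
          (fun kv hkv => PySem.Dict.get?_of_mem_items g (by simpa using hkv) H.nodup)
          hB (DLEp_refl d)
        rw [passB_eq] at *
        exact ih (j + 1) _ r1 (by have := pass_upto H hB hU; rwa [passB_eq] at this)
          (by omega)
      · have hchf : (passB g (d, false)).2 = false := by simpa using hch
        rw [if_neg (by simp [hchf])]
        obtain ⟨heq, hstab⟩ := passB_nochange_stab H hchf
        rw [heq]
        exact final_resOK H hB.keys hB.suppd hB.s0 hstab

theorem bf_init_upto (g : DGraph) (s : Int) : Upto g s 0 (initDist g s) := by
  intro v c l hw hlen
  obtain ⟨hv, hc⟩ := walk_short hw hlen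
  rw [hv, hc]
  exact ⟨0, initDist_s0 g s, le_refl _⟩

theorem bf_resOK {g : DGraph} (H : GOK g) (s : Int) : ResOK g s (bellmanFord g s) := by
  unfold bellmanFord
  exact bfLoop_resOK H (g.size + 2) 0 (initDist g s)
    ⟨initDist_keysOK g s, initDist_s0 g s, initDist_supp g s⟩
    (bf_init_upto g s) (by omega)

-- ---------- the two graph builds agree ----------

def addE (g : DGraph) (u v w : Int) : DGraph :=
  g.insert u ((g.getD u PySem.Dict.empty).insert v w)

def stepC (g : DGraph) (row : List Int) : DGraph :=
  addE (addE g ((PySem.List.pyGet? row 0).getD 0) ((PySem.List.pyGet? row 1).getD 0)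
      ((PySem.List.pyGet? row 2).getD 0))
    ((PySem.List.pyGet? row 1).getD 0) ((PySem.List.pyGet? row 0).getD 0)
    ((PySem.List.pyGet? row 2).getD 0)

def buildC (fares : List (List Int)) : DGraph := fares.foldl stepC PySem.Dict.empty

theorem stepA_eq_stepC (g : DGraph) (row : List Int) : stepA g row = stepC g row := by
  simp only [stepA, stepC, addE, PySem.Dict.getD_insert_self, PySem.Dict.insert_insert_self]

theorem sd_insert (g : DGraph) (u v w : Int) :
    (g.setdefault u PySem.Dict.empty).insert u
      (((g.setdefault u PySem.Dict.empty).getD u PySem.Dict.empty).insert v w) = addE g u v w := by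
  unfold addE
  cases hc : g.contains u with
  | true => rw [PySem.Dict.setdefault_of_contains g _ hc]
  | false =>
      rw [PySem.Dict.setdefault_of_not_contains g _ hc, PySem.Dict.getD_insert_self,
        PySem.Dict.insert_insert_self, PySem.Dict.getD_of_not_contains g _ hc]

theorem stepB_eq_stepC (g : DGraph) (row : List Int) : stepB g row = stepC g row := by
  simp only [stepB, stepC, sd_insert]

theorem foldl_step_ext {α : Type} (f g : DGraph → α → DGraph) (h : ∀ d a, f d a = g d a) :
    ∀ (L : List α) (init : DGraph), L.foldl f init = L.foldl g init := by
  intro L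
  induction L with
  | nil => intro init; rfl
  | cons a t ih => intro init; simp only [List.foldl_cons, h, ih]

theorem buildA_eq_buildC (fares : List (List Int)) : buildA fares = buildC fares :=
  foldl_step_ext stepA stepC stepA_eq_stepC fares PySem.Dict.empty

theorem buildB_eq_buildC (fares : List (List Int)) : buildB fares = buildC fares :=
  foldl_step_ext stepB stepC stepB_eq_stepC fares PySem.Dict.empty

-- ---------- the built graph is well-formed ----------

theorem addE_get? (g : DGraph) (u v w x : Int) :
    (addE g u v w).get? x =
      if x = u then some ((g.getD u PySem.Dict.empty).insert v w) else g.get? x := by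
  unfold addE
  rw [PySem.Dict.get?_insert]

theorem addE_contains (g : DGraph) (u v w x : Int) :
    (addE g u v w).contains x = (x == u || g.contains x) := by
  unfold addE
  rw [PySem.Dict.contains_insert]

theorem addE_edge {g : DGraph} {u v w x y w' : Int} (h : EdgeW (addE g u v w) x y w') :
    EdgeW g x y w' ∨ (x = u ∧ y = v ∧ w' = w) := by
  obtain ⟨adj, ha, hav⟩ := h
  rw [addE_get?] at ha
  by_cases hx : x = u
  · rw [if_pos hx] at ha
    have hadj : adj = (g.getD u PySem.Dict.empty).insert v w := by simpa using ha.symm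
    subst hadj
    rw [PySem.Dict.get?_insert] at hav
    by_cases hy : y = v
    · rw [if_pos hy] at hav
      have : w' = w := by simpa using hav.symm
      exact Or.inr ⟨hx, hy, this⟩
    · rw [if_neg hy] at hav
      cases hgc : g.get? u with
      | some adj0 =>
          rw [PySem.Dict.getD_eq_get?_getD, hgc] at hav
          simp only [Option.getD_some] at hav
          exact Or.inl ⟨adj0, by rw [hx]; exact hgc, hav⟩
      | none =>
          rw [PySem.Dict.getD_eq_get?_getD, hgc] at hav
          simp only [Option.getD_none] at hav
          rw [PySem.Dict.get?_empty] at hav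
          simp at hav
  · rw [if_neg hx] at ha
    exact Or.inl ⟨adj, ha, hav⟩

theorem addE_inner {g : DGraph} {u v w : Int}
    (h : ∀ x adj, g.get? x = some adj → adj.keys.Nodup) :
    ∀ x adj, (addE g u v w).get? x = some adj → adj.keys.Nodup := by
  intro x adj ha
  rw [addE_get?] at ha
  by_cases hx : x = u
  · rw [if_pos hx] at ha
    have hadj : adj = (g.getD u PySem.Dict.empty).insert v w := by simpa using ha.symm
    subst hadj
    apply PySem.Dict.nodup_keys_insert
    cases hgc : g.get? u with
    | some adj0 =>
        rw [PySem.Dict.getD_eq_get?_getD, hgc]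
        simp only [Option.getD_some]
        exact h u adj0 hgc
    | none =>
        rw [PySem.Dict.getD_eq_get?_getD, hgc]
        simp only [Option.getD_none]
        exact PySem.Dict.nodup_keys_empty
  · rw [if_neg hx] at ha
    exact h x adj ha

theorem buildC_fold_GOK : ∀ (fares : List (List Int)) (g : DGraph)
    (Q : Int → Prop),
    g.keys.Nodup →
    (∀ x adj, g.get? x = some adj → adj.keys.Nodup) →
    (∀ x y w', EdgeW g x y w' → Q w' ∧ g.contains y = true) →
    (∀ row ∈ fares, Q ((PySem.List.pyGet? row 2).getD 0)) →
    (fares.foldl stepC g).keys.Nodup ∧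
    (∀ x adj, (fares.foldl stepC g).get? x = some adj → adj.keys.Nodup) ∧
    (∀ x y w', EdgeW (fares.foldl stepC g) x y w' →
      Q w' ∧ (fares.foldl stepC g).contains y = true) := by
  intro fares
  induction fares with
  | nil => intro g Q h1 h2 h3 h4; exact ⟨h1, h2, h3⟩
  | cons row t ih =>
      intro g Q h1 h2 h3 h4
      simp only [List.foldl_cons]
      apply ih
      · unfold stepC addE
        exact PySem.Dict.nodup_keys_insert _ _ _ (PySem.Dict.nodup_keys_insert _ _ _ h1)
      · exact addE_inner (addE_inner h2)
      · intro x y w' hE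
        have hrQ := h4 row (by simp)
        rcases addE_edge hE with hE1 | ⟨hx, hy, hw⟩
        · rcases addE_edge hE1 with hE2 | ⟨hx, hy, hw⟩
          · obtain ⟨hq, hcy⟩ := h3 x y w' hE2
            refine ⟨hq, ?_⟩
            unfold stepC
            rw [addE_contains, addE_contains, hcy]
            simp
          · refine ⟨by rw [hw]; exact hrQ, ?_⟩
            unfold stepC
            rw [addE_contains, addE_contains, hy]
            simp
        · refine ⟨by rw [hw]; exact hrQ, ?_⟩
          unfold stepC
          rw [addE_contains, addE_contains, hy]
          simp
      · intro r hr
        exact h4 r (List.mem_cons_of_mem _ hr)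

theorem empty_no_edge : ∀ x y w', ¬ EdgeW (PySem.Dict.empty : DGraph) x y w' := by
  intro x y w' ⟨adj, ha, _⟩
  rw [PySem.Dict.get?_empty] at ha
  simp at ha

theorem buildC_GOK (fares : List (List Int))
    (hw : ∀ row ∈ fares, 0 ≤ (PySem.List.pyGet? row 2).getD 0) : GOK (buildC fares) := by
  obtain ⟨h1, h2, h3⟩ := buildC_fold_GOK fares PySem.Dict.empty (fun w => 0 ≤ w)
    PySem.Dict.nodup_keys_empty
    (by intro x adj ha; rw [PySem.Dict.get?_empty] at ha; simp at ha)
    (by intro x y w' hE; exact absurd hE (empty_no_edge x y w'))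
    hw
  exact ⟨h1, h2, fun u v w hE => (h3 u v w hE).1, fun u v w hE => (h3 u v w hE).2⟩


-- ===== VERDICT (by name: the statement is the Claim_ definition above) =====
theorem solution_spec : Claim_equal_solution := by
  intro n s a b fares hdom hpre
  unfold Spec_solution
  have hG : GOK (buildC fares) := buildC_GOK fares (fun row hr => (hpre.1 row hr).2)
  have hpt : ∀ (st v : Int), (bellmanFord (buildC fares) st).get? v
      = (dijkstra (buildC fares) st).get? v :=
    fun st v => (resOK_eq (bf_resOK hG st) (dijkstra_resOK hG st) v)
  show solution n s a b fares = solution_alt n s a b fares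
  simp only [solution, solution_alt, buildA_eq_buildC, buildB_eq_buildC, hpt]
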